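-- pv_equiv track=rewrite | github.com/makemyway-kr/cote | programmers/TOSS/4.py | solution
-- ===== SOURCE A (Python) =====
-- def solution(invitationPairs):
--     answer = []
--     connectionList = {}
--     scores = []
--     for i in invitationPairs:
--         if i[0] not in connectionList.keys():
--             connectionList[i[0]] = [i[1]]
--             connectionList[i[1]] = []
--         else:
--             connectionList[i[0]].append(i[1])
--             connectionList[i[1]] = []
--     for u in connectionList.keys():
--         score = 0
--         score += len(connectionList[u]) * 10
--         for c in connectionList[u]:
--             score += len(connectionList[c])*3
--             for c2 in connectionList[c]:
--                 score += len(connectionList[c2])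
--         scores.append([u,score])
--     scores.sort(key = lambda x : -x[1])
--     return [x[0] for x in scores[0:3] if x[1] != 0]
-- ===== SOURCE B (Python) =====
-- def solution(invitationPairs):
--     # Same graph as A: a child list is reset to [] each time the node appears as invitee.
--     children = {}
--     for pair in invitationPairs:
--         children.setdefault(pair[0], []).append(pair[1])
--         children[pair[1]] = []
--     # One pass per level instead of A's triple nested loop:
--     deg = {u: len(ch) for u, ch in children.items()}
--     s1 = {u: sum(deg[c] for c in ch) for u, ch in children.items()}
--     scores = [(u, 10 * deg[u] + 3 * s1[u] + sum(s1[c] for c in ch))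
--               for u, ch in children.items()]
--     scores.sort(key=lambda x: -x[1])
--     return [u for u, sc in scores[:3] if sc != 0]
-- ===== Notes on version B (the rewrite author's own statement) =====
-- stated objective: alternative
-- what changed: A rescans the dict with a triple-nested loop (children, grandchildren, great-grandchildren of every node); B precomputes a degree table and a one-level child-degree-sum table once and scores each node in a single pass over its direct children.
-- outside the precondition, e.g. on solution([['a']]): A raises IndexError, B raises IndexError
import Mathlib
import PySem

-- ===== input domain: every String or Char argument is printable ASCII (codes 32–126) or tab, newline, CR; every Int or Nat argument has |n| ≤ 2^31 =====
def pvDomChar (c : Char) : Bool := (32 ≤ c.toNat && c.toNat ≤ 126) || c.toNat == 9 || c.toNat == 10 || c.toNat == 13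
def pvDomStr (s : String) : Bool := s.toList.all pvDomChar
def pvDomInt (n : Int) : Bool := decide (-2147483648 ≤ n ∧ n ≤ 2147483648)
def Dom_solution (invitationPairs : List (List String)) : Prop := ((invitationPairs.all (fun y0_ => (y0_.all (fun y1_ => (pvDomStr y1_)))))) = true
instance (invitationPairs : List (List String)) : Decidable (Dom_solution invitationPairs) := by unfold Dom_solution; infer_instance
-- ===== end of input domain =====

-- B replaces A's triple-nested rescan of the invitation graph by precomputed per-node
-- degree and one-level child-degree-sum tables, scoring every node in one pass.

-- ===== PORT A =====
-- i[0] / i[1] are ported with pyGetD (default ""); Pre_solution guarantees 2 ≤ length, where this is exact.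
def solution (invitationPairs : List (List String)) : List String :=
  let connectionList : PySem.Dict String (List String) :=
    invitationPairs.foldl (fun d i =>
      let a := PySem.List.pyGetD i 0 ""
      let b := PySem.List.pyGetD i 1 ""
      if d.contains a = false then
        (d.insert a [b]).insert b []
      else
        (d.modify a [] (fun l => l ++ [b])).insert b []) PySem.Dict.empty
  let scores : List (String × Int) :=
    connectionList.keys.foldl (fun scores u =>
      let score : Int := 0 + ((connectionList.getD u []).length : Int) * 10
      let score := (connectionList.getD u []).foldl (fun score c =>
        let score := score + ((connectionList.getD c []).length : Int) * 3
        (connectionList.getD c []).foldl (fun score c2 =>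
          score + ((connectionList.getD c2 []).length : Int)) score) score
      scores ++ [(u, score)]) []
  let ss := PySem.List.sorted scores (fun x => -x.2) false
  ((PySem.List.slice ss (some 0) (some 3)).filter (fun x => x.2 != 0)).map (fun x => x.1)

-- ===== PORT B =====
-- deg[c] / s1[c] lookups are ported with getD 0: every child is a key of the dict, so the lookup never misses.
def solution_alt (invitationPairs : List (List String)) : List String :=
  let children : PySem.Dict String (List String) :=
    invitationPairs.foldl (fun d pair =>
      let a := PySem.List.pyGetD pair 0 ""
      let b := PySem.List.pyGetD pair 1 ""
      ((d.setdefault a []).modify a [] (fun l => l ++ [b])).insert b []) PySem.Dict.empty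
  let deg : PySem.Dict String Int :=
    children.items.foldl (fun e p => e.insert p.1 ((p.2.length : Int))) PySem.Dict.empty
  let s1 : PySem.Dict String Int :=
    children.items.foldl (fun e p => e.insert p.1 ((p.2.map (fun c => deg.getD c 0)).sum)) PySem.Dict.empty
  let scores : List (String × Int) :=
    children.items.map (fun p =>
      (p.1, 10 * deg.getD p.1 0 + 3 * s1.getD p.1 0 + (p.2.map (fun c => s1.getD c 0)).sum))
  let ss := PySem.List.sorted scores (fun x => -x.2) false
  ((PySem.List.slice ss (some 0) (some 3)).filter (fun x => x.2 != 0)).map (fun x => x.1)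

-- ===== PRECONDITION & SPEC =====
-- Pre_ excludes exactly the inputs on which A raises IndexError: a pair with fewer than two entries.
def Pre_solution (invitationPairs : List (List String)) : Prop :=
  ∀ p ∈ invitationPairs, 2 ≤ p.length
instance (invitationPairs : List (List String)) : Decidable (Pre_solution invitationPairs) := by
  unfold Pre_solution; infer_instance
def pvWitness_solution : List (List String) := [["a", "b"], ["b", "c"]]
def Spec_solution (invitationPairs : List (List String)) (out : List String) : Prop := out = solution_alt invitationPairs
instance (invitationPairs : List (List String)) (out : List String) : Decidable (Spec_solution invitationPairs out) := by unfold Spec_solution; infer_instance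

-- ===== CLAIM (what is proved, stated in full; the proofs are below) =====
def Claim_equal_solution : Prop := ∀ (invitationPairs : List (List String)), Dom_solution invitationPairs → Pre_solution invitationPairs → Spec_solution invitationPairs (solution invitationPairs)

-- ===== LEMMAS AND PROOFS =====

def pvGood (d : PySem.Dict String (List String)) : Prop :=
  d.keys.Nodup ∧ ∀ u c, c ∈ d.getD u [] → d.contains c = true

theorem pvGood_ins (d : PySem.Dict String (List String)) (a b : String) (L : List String)
    (h : pvGood d) (hL : ∀ c ∈ L, c = b ∨ d.contains c = true) :
    pvGood ((d.insert a L).insert b []) := by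
  obtain ⟨hn, hc⟩ := h
  refine ⟨PySem.Dict.nodup_keys_insert _ _ _ (PySem.Dict.nodup_keys_insert _ _ _ hn), ?_⟩
  intro u c hm
  rw [PySem.Dict.getD_insert, PySem.Dict.getD_insert] at hm
  simp only [PySem.Dict.contains_insert]
  split_ifs at hm with h1 h2
  · simp at hm
  · rcases hL c hm with rfl | hcon
    · simp
    · simp [hcon]
  · simp [hc u c hm]

def pvStepA (d : PySem.Dict String (List String)) (i : List String) : PySem.Dict String (List String) :=
  let a := PySem.List.pyGetD i 0 ""
  let b := PySem.List.pyGetD i 1 ""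
  if d.contains a = false then
    (d.insert a [b]).insert b []
  else
    (d.modify a [] (fun l => l ++ [b])).insert b []

theorem pvGood_step (d : PySem.Dict String (List String)) (i : List String) (h : pvGood d) :
    pvGood (pvStepA d i) := by
  cases hca : d.contains (PySem.List.pyGetD i 0 "") with
  | false =>
      simp only [pvStepA, hca]
      exact pvGood_ins d _ _ _ h (by intro c hc; simp at hc; exact Or.inl hc)
  | true =>
      simp only [pvStepA, hca, PySem.Dict.modify, Bool.true_eq_false, if_false]
      refine pvGood_ins d _ _ _ h ?_
      intro c hc
      simp only [List.mem_append, List.mem_singleton] at hc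
      rcases hc with hc | rfl
      · exact Or.inr (h.2 _ _ hc)
      · exact Or.inl rfl

theorem pvGood_build_aux (ps : List (List String)) :
    ∀ d, pvGood d → pvGood (ps.foldl pvStepA d) := by
  induction ps with
  | nil => intro d h; exact h
  | cons p t ih => intro d h; exact ih _ (pvGood_step d p h)

theorem pvGood_build (ps : List (List String)) :
    pvGood (ps.foldl pvStepA PySem.Dict.empty) := by
  refine pvGood_build_aux ps _ ⟨?_, ?_⟩
  · simp [PySem.Dict.keys_empty]
  · intro u c hc; simp [PySem.Dict.getD_empty] at hc

theorem pvGetD_tab (d : PySem.Dict String (List String)) (hn : d.keys.Nodup)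
    (f : List String → Int) (u : String) (hu : d.contains u = true) :
    (d.items.foldl (fun e p => e.insert p.1 (f p.2)) PySem.Dict.empty).getD u 0
      = f (d.getD u []) := by
  have hitems : (d.items.foldl (fun e p => e.insert p.1 (f p.2)) PySem.Dict.empty).items
      = PySem.Dict.empty.items ++ d.items.map (fun p => (p.1, f p.2)) := by
    refine PySem.Dict.items_foldl_insert_fresh d.items Prod.fst (fun p => f p.2) _ ?_ ?_
    · intro p _; exact PySem.Dict.contains_empty _
    · exact hn
  have hsome : (d.get? u).isSome := by
    rw [← PySem.Dict.contains_eq_isSome_get?]; exact hu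
  obtain ⟨ch, hch⟩ := Option.isSome_iff_exists.mp hsome
  have hmem : (u, ch) ∈ d.items := PySem.Dict.mem_items_of_get?_eq_some d hch
  have hkeys : (d.items.foldl (fun e p => e.insert p.1 (f p.2)) PySem.Dict.empty).keys = d.keys := by
    show (List.foldl (fun e p => e.insert p.1 (f p.2)) PySem.Dict.empty d.items).items.map Prod.fst
        = d.items.map Prod.fst
    rw [hitems]
    simp [PySem.Dict.empty]
  have htabmem : (u, f ch) ∈ (d.items.foldl (fun e p => e.insert p.1 (f p.2)) PySem.Dict.empty).items := by
    rw [hitems]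
    simp only [PySem.Dict.empty, List.nil_append]
    exact List.mem_map.mpr ⟨(u, ch), hmem, rfl⟩
  rw [PySem.Dict.getD_of_mem_items _ htabmem (by rw [hkeys]; exact hn) 0,
    PySem.Dict.getD_of_get?_eq_some d [] hch]

theorem pvStep_eq (d : PySem.Dict String (List String)) (i : List String) :
    ((d.setdefault (PySem.List.pyGetD i 0 "") []).modify (PySem.List.pyGetD i 0 "") []
        (fun l => l ++ [PySem.List.pyGetD i 1 ""])).insert (PySem.List.pyGetD i 1 "") []
      = pvStepA d i := by
  unfold pvStepA
  cases h : d.contains (PySem.List.pyGetD i 0 "") with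
  | false =>
      rw [PySem.Dict.setdefault_of_not_contains d [] h]
      simp [PySem.Dict.modify, PySem.Dict.getD_insert_self, PySem.Dict.insert_insert_self, h]
  | true =>
      rw [PySem.Dict.setdefault_of_contains d [] h]
      simp [h]

theorem pvScores_eq (G : PySem.Dict String (List String))
    (hn : G.keys.Nodup)
    (hcl : ∀ u c, c ∈ G.getD u [] → G.contains c = true)
    (degD s1D : PySem.Dict String Int)
    (hdeg : ∀ u, G.contains u = true → degD.getD u 0 = ((G.getD u []).length : Int))
    (hs1 : ∀ u, G.contains u = true →
      s1D.getD u 0 = ((G.getD u []).map (fun x => ((G.getD x []).length : Int))).sum) :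
    G.keys.foldl (fun scores u =>
        scores ++ [(u, (G.getD u []).foldl (fun score c =>
          (G.getD c []).foldl (fun score c2 => score + ((G.getD c2 []).length : Int))
            (score + ((G.getD c []).length : Int) * 3))
          (0 + ((G.getD u []).length : Int) * 10))]) []
      = G.items.map (fun p =>
          (p.1, 10 * degD.getD p.1 0 + 3 * s1D.getD p.1 0
            + (p.2.map (fun c => s1D.getD c 0)).sum)) := by
  set L : String → Int := fun x => ((G.getD x []).length : Int) with hL
  set S1 : String → Int := fun x => ((G.getD x []).map L).sum with hS1
  rw [PySem.List.foldl_append_singleton_eq_map, PySem.Dict.items_eq_map_keys G hn [], List.map_map,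
    List.nil_append]
  refine List.map_congr_left ?_
  intro u hu
  have hcu : G.contains u = true := (PySem.Dict.contains_iff_mem_keys G u).mpr hu
  simp only [Function.comp]
  refine Prod.ext rfl ?_
  show ((G.getD u []).foldl (fun score c =>
        (G.getD c []).foldl (fun score c2 => score + ((G.getD c2 []).length : Int))
          (score + ((G.getD c []).length : Int) * 3))
        (0 + ((G.getD u []).length : Int) * 10)) = _
  have houter : (G.getD u []).foldl (fun score c =>
        (G.getD c []).foldl (fun score c2 => score + ((G.getD c2 []).length : Int))
          (score + ((G.getD c []).length : Int) * 3))
        (0 + ((G.getD u []).length : Int) * 10)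
      = (G.getD u []).foldl (fun score c => score + (L c * 3 + S1 c))
        (0 + ((G.getD u []).length : Int) * 10) := by
    refine List.foldl_ext _ _ _ ?_
    intro s c _
    rw [PySem.List.foldl_add]
    simp only [hL, hS1]
    ring
  rw [houter, PySem.List.foldl_add, hdeg u hcu, hs1 u hcu]
  have hsum : ((G.getD u []).map (fun c => L c * 3 + S1 c)).sum
      = ((G.getD u []).map (fun c => L c * 3)).sum + ((G.getD u []).map S1).sum := by
    rw [← PySem.List.sum_map_add_int]
  have hsum3 : ((G.getD u []).map (fun c => L c * 3)).sum = S1 u * 3 := by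
    rw [List.sum_map_mul_right]
  have hlast : ((G.getD u []).map (fun c => s1D.getD c 0)).sum = ((G.getD u []).map S1).sum := by
    refine congrArg List.sum (List.map_congr_left ?_)
    intro c hc
    rw [hs1 c (hcl u c hc)]
  rw [hsum, hsum3, hlast]
  have h1 : L u = ((G.getD u []).length : Int) := rfl
  have h2 : ((G.getD u []).map (fun x => ((G.getD x []).length : Int))).sum = S1 u := rfl
  rw [← h1, h2]
  ring

theorem solution_eq_alt (ps : List (List String)) : solution ps = solution_alt ps := by
  unfold solution solution_alt
  dsimp only
  have hbuildB : (ps.foldl (fun d pair =>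
      ((d.setdefault (PySem.List.pyGetD pair 0 "") []).modify (PySem.List.pyGetD pair 0 "") []
        (fun l => l ++ [PySem.List.pyGetD pair 1 ""])).insert (PySem.List.pyGetD pair 1 "") [])
      PySem.Dict.empty) = ps.foldl pvStepA PySem.Dict.empty := by
    exact List.foldl_ext _ _ _ (fun d i _ => pvStep_eq d i)
  have hbuildA : (ps.foldl (fun d i =>
      let a := PySem.List.pyGetD i 0 ""
      let b := PySem.List.pyGetD i 1 ""
      if d.contains a = false then (d.insert a [b]).insert b []
      else (d.modify a [] (fun l => l ++ [b])).insert b []) PySem.Dict.empty)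
      = ps.foldl pvStepA PySem.Dict.empty := rfl
  rw [hbuildA, hbuildB]
  obtain ⟨hn, hcl⟩ := pvGood_build ps
  set G := ps.foldl pvStepA PySem.Dict.empty with hG
  have hdeg : ∀ u, G.contains u = true →
      (G.items.foldl (fun e p => e.insert p.1 ((p.2.length : Int))) PySem.Dict.empty).getD u 0
        = ((G.getD u []).length : Int) :=
    fun u hu => pvGetD_tab G hn (fun ch => (ch.length : Int)) u hu
  have hs1 : ∀ u, G.contains u = true →
      (G.items.foldl (fun e p => e.insert p.1 ((p.2.map (fun c =>
          (G.items.foldl (fun e p => e.insert p.1 ((p.2.length : Int))) PySem.Dict.empty).getD c 0)).sum))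
        PySem.Dict.empty).getD u 0
        = ((G.getD u []).map (fun x => ((G.getD x []).length : Int))).sum := by
    intro u hu
    rw [pvGetD_tab G hn (fun ch => (ch.map (fun c =>
        (G.items.foldl (fun e p => e.insert p.1 ((p.2.length : Int))) PySem.Dict.empty).getD c 0)).sum) u hu]
    refine congrArg List.sum (List.map_congr_left ?_)
    intro c hc
    exact hdeg c (hcl u c hc)
  rw [pvScores_eq G hn hcl _ _ hdeg hs1]

-- ===== VERDICT (by name: the statement is the Claim_ definition above) =====
theorem solution_spec : Claim_equal_solution := by
  intro ps _ _
  exact solution_eq_alt ps
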